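-- pv_equiv track=rewrite | github.com/Seirdy/func-analysis | func_analysis/af_util.py | make_intervals
-- ===== SOURCE A (Python) =====
-- from itertools import chain
-- from numbers import Real
-- from typing import Callable, Iterable, Iterator, List, NamedTuple
--
-- class Interval(NamedTuple):
--     """Special NamedTuple for interval between two numbers."""
--
--     start: Real
--     stop: Real
--
-- def make_intervals(points: Iterable[Real]) -> Iterator[Interval]:
--     """Make intervals that pair each point to the next.
--
--     Parameters
--     ----------
--     points
--         A list of points
--
--     Returns
--     -------
--     intervals : List[Interval]
--         A list of intervals in which every two points have been paired.
--
--     """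
--     # Make an iterator that yields each point twice.
--     doubled = chain.from_iterable((point, point) for point in points)
--     # Chop off the first point. The last point will be dropped automatically.
--     try:
--         next(doubled)
--     except StopIteration:
--         raise ValueError("Must have more than one point to make intervals.")
--     # zip two copies of doubled and make each resulting pair an Interval.
--     to_zip = [doubled] * 2
--     for pair in zip(*to_zip):
--         yield Interval(*pair)
-- ===== SOURCE B (Python) =====
-- class Interval(tuple):
--     def __new__(cls, start, stop):
--         return super().__new__(cls, (start, stop))
--
-- def make_intervals(points):
--     """Pair each point with the next; explicit previous-element loop."""
--     it = iter(points)
--     try: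
--         prev = next(it)
--     except StopIteration:
--         raise ValueError("Must have more than one point to make intervals.")
--     for cur in it:
--         yield Interval(prev, cur)
--         prev = cur
-- ===== Notes on version B (the rewrite author's own statement) =====
-- stated objective: simpler
-- what changed: Replaces the doubled iterator (each point emitted twice, head chopped, two aliased copies zipped) by a plain running-prev loop that pairs each element with its predecessor.
-- outside the precondition, e.g. on make_intervals([]): A raises ValueError, B raises ValueError
import Mathlib
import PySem

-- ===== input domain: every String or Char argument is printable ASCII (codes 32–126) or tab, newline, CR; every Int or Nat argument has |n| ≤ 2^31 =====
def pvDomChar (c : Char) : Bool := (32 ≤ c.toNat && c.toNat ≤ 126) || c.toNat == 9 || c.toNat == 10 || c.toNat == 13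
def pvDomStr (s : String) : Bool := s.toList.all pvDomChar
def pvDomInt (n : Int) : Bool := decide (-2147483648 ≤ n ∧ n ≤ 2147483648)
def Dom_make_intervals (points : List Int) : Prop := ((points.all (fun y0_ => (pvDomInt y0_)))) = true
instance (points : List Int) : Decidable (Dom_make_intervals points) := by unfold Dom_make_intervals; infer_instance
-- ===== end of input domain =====

-- B replaces A's doubled-iterator/zip construction by a plain running-prev loop (objective: simpler).


-- ===== PORT A =====
-- zip(*[doubled]*2): consume the remaining doubled stream two elements at a time
def pairUp : List Int → List (Int × Int)
  | a :: b :: t => (a, b) :: pairUp t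
  | _ => []

def make_intervals (points : List Int) : List (Int × Int) :=
  -- doubled = chain.from_iterable((p, p) for p in points)
  let doubled := points.flatMap (fun p => [p, p])
  -- next(doubled): drop the first element (empty ⇒ ValueError, excluded by Pre_)
  match doubled with
  | [] => []
  | _ :: rest => pairUp rest

-- ===== PORT B =====
-- for cur in it: yield (prev, cur); prev = cur
def prevLoop (prev : Int) : List Int → List (Int × Int)
  | [] => []
  | cur :: t => (prev, cur) :: prevLoop cur t

def make_intervals_alt (points : List Int) : List (Int × Int) :=
  match points with
  | [] => []   -- ValueError in Python, excluded by Pre_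
  | prev :: it => prevLoop prev it

-- ===== PRECONDITION & SPEC =====
-- Pre_ excludes the empty list, on which both A and B raise ValueError when first iterated.
def Pre_make_intervals (points : List Int) : Prop := points ≠ []
instance (points : List Int) : Decidable (Pre_make_intervals points) := by unfold Pre_make_intervals; infer_instance
def pvWitness_make_intervals : List Int := [1, 2, 3]

def Spec_make_intervals (points : List Int) (out : List (Int × Int)) : Prop := out = make_intervals_alt points
instance (points : List Int) (out : List (Int × Int)) : Decidable (Spec_make_intervals points out) := by unfold Spec_make_intervals; infer_instance

-- ===== CLAIM (what is proved, stated in full; the proofs are below) =====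
def Claim_equal_make_intervals : Prop := ∀ (points : List Int), Dom_make_intervals points → Pre_make_intervals points → Spec_make_intervals points (make_intervals points)

-- ===== LEMMAS AND PROOFS =====
theorem pairUp_doubled (x : Int) (l : List Int) :
    pairUp (x :: l.flatMap (fun p => [p, p])) = prevLoop x l := by
  induction l generalizing x with
  | nil => rfl
  | cons c t ih => simp [List.flatMap_cons, pairUp, prevLoop, ih]

-- ===== VERDICT (by name: the statement is the Claim_ definition above) =====
theorem make_intervals_spec : Claim_equal_make_intervals := by
  intro points _ hpre
  cases points with
  | nil => exact absurd rfl hpre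
  | cons p rest =>
    show make_intervals (p :: rest) = make_intervals_alt (p :: rest)
    simp [make_intervals, make_intervals_alt, List.flatMap_cons, pairUp_doubled]
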